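-- pv_equiv track=rewrite | github.com/Duduzinhoextrem/Teste_logica | pergunta_4/solucao.py | completar_intervalo
-- ===== SOURCE A (Python) =====
-- def completar_intervalo(arr):
--     if len(arr) == 0:
--         return []
--
--     n = max(arr)
--     faltantes = []
--
--     for i in range(n + 1):
--         if i not in arr:
--             faltantes.append(i)
--
--     arr.extend(faltantes)
--     arr.sort()
--
--     return arr
-- ===== SOURCE B (Python) =====
-- def completar_intervalo(arr):
--     # Single merge pass over a sorted copy: walk the sorted values once, emitting
--     # the gap integers below each element with a running counter `nxt`; no
--     # membership tests and no final sort of a combined list. Mutates arr in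
--     # place (arr[:] = out) like the original's extend+sort.
--     if len(arr) == 0:
--         return []
--     out = []
--     nxt = 0
--     for x in sorted(arr):
--         while nxt < x:
--             out.append(nxt)
--             nxt += 1
--         out.append(x)
--         if nxt <= x:
--             nxt = x + 1
--     arr[:] = out
--     return arr
-- ===== Notes on version B (the rewrite author's own statement) =====
-- stated objective: faster
-- what changed: Instead of scanning range(max+1) with a per-element membership test and then sorting the extended list, B sorts the input once and does a single merge pass with a running counter that emits each gap integer in place, producing the output already sorted.
import Mathlib
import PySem

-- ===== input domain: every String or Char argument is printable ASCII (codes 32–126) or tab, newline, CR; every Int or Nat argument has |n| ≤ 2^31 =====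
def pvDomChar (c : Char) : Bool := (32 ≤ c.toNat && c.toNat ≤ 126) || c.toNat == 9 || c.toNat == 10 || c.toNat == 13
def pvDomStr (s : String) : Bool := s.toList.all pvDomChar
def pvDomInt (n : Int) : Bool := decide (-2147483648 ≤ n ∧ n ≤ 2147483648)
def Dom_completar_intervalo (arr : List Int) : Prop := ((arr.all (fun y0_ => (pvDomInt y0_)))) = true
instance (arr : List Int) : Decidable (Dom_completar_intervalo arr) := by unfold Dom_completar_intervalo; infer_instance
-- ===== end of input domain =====

-- ===== PORT A =====
-- A scans range(max+1) with a membership test, extends and sorts; B sorts once and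
-- does a single merge pass emitting gap integers via a running counter (faster, no
-- membership tests). Both Pythons mutate arr in place to the same final contents;
-- the equivalence proved here is about the return value.
def completar_intervalo (arr : List Int) : List Int :=
  if arr.length = 0 then []
  else
    let n := (PySem.List.max? arr (fun x => x)).getD 0  -- arr ≠ [], so max? is some
    let faltantes := (PySem.List.pyRange 0 (n + 1) 1).foldl
      (fun acc i => if i ∉ arr then acc ++ [i] else acc) []
    PySem.List.sorted (arr ++ faltantes) (fun x => x) false

-- ===== PORT B =====
-- the inner 'while nxt < x: out.append(nxt); nxt += 1'
def ciFill (nxt x : Int) : List Int :=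
  if nxt < x then nxt :: ciFill (nxt + 1) x else []
termination_by (x - nxt).toNat
decreasing_by omega

-- the 'for x in sorted(arr)' loop carrying (nxt, out)
def ciLoop : List Int → Int → List Int → List Int
  | [], _, out => out
  | x :: rest, nxt, out =>
      ciLoop rest (if nxt ≤ x then x + 1 else nxt) (out ++ ciFill nxt x ++ [x])

def completar_intervalo_alt (arr : List Int) : List Int :=
  if arr.length = 0 then []
  else ciLoop (PySem.List.sorted arr (fun x => x) false) 0 []

-- ===== PRECONDITION & SPEC =====
def Spec_completar_intervalo (arr : List Int) (out : List Int) : Prop := out = completar_intervalo_alt arr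
instance (arr : List Int) (out : List Int) : Decidable (Spec_completar_intervalo arr out) := by unfold Spec_completar_intervalo; infer_instance

-- ===== CLAIM (what is proved, stated in full; the proofs are below) =====
def Claim_equal_completar_intervalo : Prop := ∀ (arr : List Int), Dom_completar_intervalo arr → Spec_completar_intervalo arr (completar_intervalo arr)

-- ===== LEMMAS AND PROOFS =====

-- the loop without its accumulator
def ciRun : List Int → Int → List Int
  | [], _ => []
  | x :: rest, nxt => ciFill nxt x ++ x :: ciRun rest (if nxt ≤ x then x + 1 else nxt)

-- the final value of nxt
def ciTop : List Int → Int → Int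
  | [], nxt => nxt
  | x :: rest, nxt => ciTop rest (if nxt ≤ x then x + 1 else nxt)

theorem ciLoop_eq (s : List Int) : ∀ nxt out, ciLoop s nxt out = out ++ ciRun s nxt := by
  induction s with
  | nil => intro nxt out; simp [ciLoop, ciRun]
  | cons x rest ih => intro nxt out; simp [ciLoop, ciRun, ih]

theorem ciFill_eq (x : Int) : ∀ nxt, ciFill nxt x = PySem.List.pyRange nxt x 1 := by
  have h : ∀ (k : Nat) (nxt : Int), (x - nxt).toNat = k → ciFill nxt x = PySem.List.pyRange nxt x 1 := by
    intro k
    induction k with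
    | zero => intro nxt hk; rw [ciFill, PySem.List.pyRange_one_eq_nil (by omega)]; simp [show ¬ nxt < x by omega]
    | succ k ih =>
      intro nxt hk
      rw [ciFill, PySem.List.pyRange_one_cons (by omega)]
      simp [show nxt < x by omega, ih (nxt + 1) (by omega)]
  intro nxt; exact h _ nxt rfl

theorem le_ciTop (s : List Int) : ∀ nxt, nxt ≤ ciTop s nxt := by
  induction s with
  | nil => intro nxt; simp [ciTop]
  | cons x rest ih =>
    intro nxt
    have := ih (if nxt ≤ x then x + 1 else nxt)
    simp only [ciTop]
    split at this <;> split <;> omega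

-- elements of the run are input elements or ≥ the counter
theorem mem_ciRun (s : List Int) : ∀ nxt y, y ∈ ciRun s nxt → y ∈ s ∨ nxt ≤ y := by
  induction s with
  | nil => intro nxt y h; simp [ciRun] at h
  | cons x rest ih =>
    intro nxt y h
    simp only [ciRun, List.mem_append, List.mem_cons, ciFill_eq, PySem.List.mem_pyRange_one] at h
    rcases h with h | h | h
    · right; omega
    · left; simp [h]
    · rcases ih _ _ h with h' | h'
      · left; simp [h']
      · right; split at h' <;> omega

-- the output of the run is sorted
theorem pairwise_ciRun (s : List Int) : ∀ nxt, s.Pairwise (· ≤ ·) → (ciRun s nxt).Pairwise (· ≤ ·) := by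
  induction s with
  | nil => intro nxt _; simp [ciRun]
  | cons x rest ih =>
    intro nxt hs
    rw [List.pairwise_cons] at hs
    simp only [ciRun, ciFill_eq]
    rw [List.pairwise_append]
    refine ⟨(PySem.List.pairwise_lt_pyRange_one nxt x).imp (fun h => le_of_lt h), ?_, ?_⟩
    · rw [List.pairwise_cons]
      refine ⟨?_, ih _ hs.2⟩
      intro y hy
      rcases mem_ciRun _ _ _ hy with h | h
      · exact hs.1 y h
      · split at h <;> omega
    · intro a ha b hb
      rw [PySem.List.mem_pyRange_one] at ha
      rcases List.mem_cons.mp hb with rfl | hb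
      · omega
      · rcases mem_ciRun _ _ _ hb with h | h
        · have := hs.1 b h; omega
        · split at h <;> omega

-- the run is a permutation of s plus the fresh integers in [nxt, ciTop s nxt)
theorem ciRun_perm (s : List Int) : ∀ nxt, s.Pairwise (· ≤ ·) →
    (ciRun s nxt).Perm (s ++ (PySem.List.pyRange nxt (ciTop s nxt) 1).filter (fun i => decide (i ∉ s))) := by
  induction s with
  | nil => intro nxt _; simp [ciRun, ciTop, PySem.List.pyRange_one_eq_nil (le_refl nxt)]
  | cons x rest ih =>
    intro nxt hs
    rw [List.pairwise_cons] at hs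
    by_cases hcase : nxt ≤ x
    · -- fill is [nxt, x), x is in the range, tail range starts at x + 1
      simp only [ciRun, ciTop, ciFill_eq, if_pos hcase]
      have hrest := ih (x + 1) hs.2
      have hTop := le_ciTop rest (x + 1)
      have hsplit : PySem.List.pyRange nxt (ciTop rest (x + 1)) 1
          = (PySem.List.pyRange nxt x 1 ++ [x]) ++ PySem.List.pyRange (x + 1) (ciTop rest (x + 1)) 1 := by
        rw [← PySem.List.pyRange_one_succ_right hcase]
        exact PySem.List.pyRange_one_append nxt (x + 1) _ (by omega) hTop
      have hfilter_hi : (PySem.List.pyRange (x + 1) (ciTop rest (x + 1)) 1).filter (fun i => decide (i ∉ x :: rest))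
          = (PySem.List.pyRange (x + 1) (ciTop rest (x + 1)) 1).filter (fun i => decide (i ∉ rest)) := by
        apply List.filter_congr
        intro i hi
        rw [PySem.List.mem_pyRange_one] at hi
        have : i ≠ x := by omega
        simp [this]
      have hfilter_lo : (PySem.List.pyRange nxt x 1).filter (fun i => decide (i ∉ x :: rest))
          = PySem.List.pyRange nxt x 1 := by
        rw [List.filter_eq_self]
        intro i hi
        rw [PySem.List.mem_pyRange_one] at hi
        have hx : i ≠ x := by omega
        have hr : i ∉ rest := fun hmem => by have := hs.1 i hmem; omega
        simp [hx, hr]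
      rw [hsplit, List.filter_append, List.filter_append, hfilter_lo, hfilter_hi]
      have hfx : List.filter (fun i => decide (i ∉ x :: rest)) [x] = [] := by simp
      rw [hfx, List.append_nil]
      refine ((List.Perm.append_left _ (List.Perm.cons x hrest)).trans ?_)
      refine List.perm_append_comm.trans ?_
      show List.Perm (x :: ((rest ++ _) ++ _)) (x :: (rest ++ _))
      refine List.Perm.cons x ?_
      rw [List.append_assoc]
      exact List.Perm.append_left rest List.perm_append_comm
    · -- x < nxt: no fill, the whole range lies above x
      simp only [ciRun, ciTop, ciFill_eq, if_neg hcase]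
      have hrest := ih nxt hs.2
      have hfilter_hi : (PySem.List.pyRange nxt (ciTop rest nxt) 1).filter (fun i => decide (i ∉ x :: rest))
          = (PySem.List.pyRange nxt (ciTop rest nxt) 1).filter (fun i => decide (i ∉ rest)) := by
        apply List.filter_congr
        intro i hi
        rw [PySem.List.mem_pyRange_one] at hi
        have : i ≠ x := by omega
        simp [this]
      rw [show PySem.List.pyRange nxt x 1 = [] from PySem.List.pyRange_one_eq_nil (by omega), hfilter_hi, List.nil_append]
      exact List.Perm.cons x hrest

-- the final counter when all elements are below it
theorem ciTop_of_all_lt (s : List Int) : ∀ nxt, (∀ y ∈ s, y < nxt) → ciTop s nxt = nxt := by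
  induction s with
  | nil => intro nxt _; rfl
  | cons x rest ih =>
    intro nxt h
    have hx : x < nxt := h x (by simp)
    simp only [ciTop, show ¬ nxt ≤ x by omega, if_false]
    exact ih nxt (fun y hy => h y (by simp [hy]))

-- the final counter when some element clears it: it becomes last + 1
theorem ciTop_of_mem (s : List Int) : ∀ nxt m (hne : s ≠ []), s.Pairwise (· ≤ ·) → m ∈ s → nxt ≤ m + 1 →
    ciTop s nxt = s.getLast hne + 1 := by
  induction s with
  | nil => intro _ _ hne; exact absurd rfl hne
  | cons x rest ih =>
    intro nxt m hne hs hm hle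
    rw [List.pairwise_cons] at hs
    simp only [ciTop]
    rcases eq_or_ne rest [] with hr | hr
    · subst hr
      simp only [List.mem_singleton] at hm
      subst hm
      simp only [ciTop, List.getLast_singleton]
      split <;> omega
    · rw [List.getLast_cons hr]
      rcases List.mem_cons.mp hm with rfl | hm'
      · -- m = x: the counter becomes x + 1, the head of rest clears it
        have hh : rest.head (by exact hr) ∈ rest := List.head_mem hr
        refine ih _ (rest.head hr) hr hs.2 hh ?_
        have := hs.1 _ hh
        split <;> omega
      · refine ih _ m hr hs.2 hm' ?_
        have := hs.1 m hm'
        split <;> omega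

-- elements of a ≤-sorted list are bounded by its last element
theorem le_getLast_of_pairwise (s : List Int) (hne : s ≠ []) (hs : s.Pairwise (· ≤ ·)) :
    ∀ y ∈ s, y ≤ s.getLast hne := by
  induction s with
  | nil => exact absurd rfl hne
  | cons x rest ih =>
    rw [List.pairwise_cons] at hs
    intro y hy
    rcases eq_or_ne rest [] with hr | hr
    · subst hr; simp at hy; simp [hy]
    · rw [List.getLast_cons hr]
      rcases List.mem_cons.mp hy with rfl | hy'
      · exact le_trans (hs.1 _ (List.getLast_mem hr)) (le_refl _)
      · exact ih hr hs.2 y hy'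

theorem completar_intervalo_eq (arr : List Int) :
    completar_intervalo arr = completar_intervalo_alt arr := by
  unfold completar_intervalo completar_intervalo_alt
  by_cases h : arr.length = 0
  · simp [h]
  · simp only [h, if_false]
    have harr : arr ≠ [] := by intro hc; simp [hc] at h
    set s := PySem.List.sorted arr (fun x => x) false with hsdef
    have hperm : s.Perm arr := PySem.List.sorted_perm arr (fun x => x) false
    have hsne : s ≠ [] := by
      intro hc
      apply h
      rw [← hperm.length_eq, hc]
      rfl
    have hpw : s.Pairwise (· ≤ ·) := PySem.List.sorted_pairwise arr (fun x => x)
    -- the max of arr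
    obtain ⟨m, hm⟩ : ∃ m, PySem.List.max? arr (fun x => x) = some m := by
      cases arr with
      | nil => exact absurd rfl harr
      | cons a t => exact ⟨t.foldl max a, PySem.List.max?_id_cons a t⟩
    have hmmem : m ∈ arr := PySem.List.max?_mem hm
    have hmmax : ∀ y ∈ arr, y ≤ m := fun y hy => PySem.List.max?_isMax hm y hy
    rw [hm]
    simp only [Option.getD_some]
    -- A's faltantes as a filter
    rw [PySem.List.foldl_append_ite_eq_filter]
    -- identify the two ranges of fresh integers
    have hlast : s.getLast hsne = m := by
      have h1 : s.getLast hsne ≤ m := hmmax _ (hperm.mem_iff.mp (List.getLast_mem hsne))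
      have h2 : m ≤ s.getLast hsne := le_getLast_of_pairwise s hsne hpw m (hperm.mem_iff.mpr hmmem)
      omega
    have hranges : PySem.List.pyRange 0 (ciTop s 0) 1 = PySem.List.pyRange 0 (m + 1) 1 := by
      by_cases hm0 : 0 ≤ m
      · rw [ciTop_of_mem s 0 m hsne hpw (hperm.mem_iff.mpr hmmem) (by omega), hlast]
      · rw [ciTop_of_all_lt s 0 (fun y hy => by have := hmmax y (hperm.mem_iff.mp hy); omega)]
        rw [PySem.List.pyRange_one_eq_nil (le_refl 0), PySem.List.pyRange_one_eq_nil (by omega)]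
    -- B = the sorted output
    rw [ciLoop_eq, List.nil_append]
    apply PySem.List.sorted_id_eq_of_perm_of_pairwise
    · -- permutation
      refine (ciRun_perm s 0 hpw).trans ?_
      rw [hranges]
      refine (List.Perm.append hperm ?_)
      apply List.Perm.of_eq
      apply List.filter_congr
      intro i _
      simp [hperm.mem_iff]
    · exact pairwise_ciRun s 0 hpw

-- ===== VERDICT (by name: the statement is the Claim_ definition above) =====
theorem completar_intervalo_spec : Claim_equal_completar_intervalo := by
  intro arr _
  exact completar_intervalo_eq arr
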